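-- pv_equiv track=rewrite | github.com/cattermelon1234/Cybersecurity | vigenere_cracker.py | get_ciphers
-- ===== SOURCE A (Python) =====
-- def get_ciphers(length, message):
--     ciphers = []
--     for x in range(length):
--         string = ""
--         i = x
--         while i < len(message):
--             string += str(message[i])
--             i += length
--         ciphers.append(string)
--     return ciphers
-- ===== SOURCE B (Python) =====
-- def get_ciphers(length, message):
--     if length <= 0:
--         return []
--     ciphers = [""] * length
--     for i, ch in enumerate(message):
--         ciphers[i % length] += str(ch)
--     return ciphers
-- ===== Notes on version B (the rewrite author's own statement) =====
-- stated objective: alternative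
-- what changed: Replaces A's length separate strided scans over the message with a single flat pass that distributes each character into its residue bucket i % length.
import Mathlib
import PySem

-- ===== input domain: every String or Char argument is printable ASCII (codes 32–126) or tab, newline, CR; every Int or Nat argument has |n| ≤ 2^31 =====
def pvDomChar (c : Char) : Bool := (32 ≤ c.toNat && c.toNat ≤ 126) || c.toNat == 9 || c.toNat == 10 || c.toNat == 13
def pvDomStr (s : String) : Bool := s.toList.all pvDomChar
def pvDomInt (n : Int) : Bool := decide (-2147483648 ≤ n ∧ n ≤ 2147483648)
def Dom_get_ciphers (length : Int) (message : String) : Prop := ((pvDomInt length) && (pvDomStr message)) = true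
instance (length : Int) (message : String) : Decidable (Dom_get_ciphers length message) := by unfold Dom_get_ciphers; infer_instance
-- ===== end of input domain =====

-- B replaces A's `length` strided scans with one pass binning each character into bucket i % length; same cost class, fewer passes.

-- ===== PORT A =====
-- inner `while i < len(message): string += str(message[i]); i += length` collecting the chars;
-- the `0 < L` guard only makes the recursion total: A only runs the loop for x ∈ range(length), so L ≥ 1 there.
def getCiphersWhile (msg : List Char) (L : Int) (i : Int) : List Char :=
  if h : 0 < L ∧ 0 ≤ i ∧ i < (msg.length : Int) then
    msg[i.toNat]'(by omega) :: getCiphersWhile msg L (i + L)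
  else []
termination_by ((msg.length : Int) - i).toNat
decreasing_by omega

def get_ciphers (length : Int) (message : String) : List String :=
  (PySem.List.pyRange 0 length 1).foldl
    (fun ciphers x => ciphers ++ [String.ofList (getCiphersWhile message.toList length x)]) []

-- ===== PORT B =====
-- Source B: if length <= 0: return []; ciphers = [""]*length; for i, ch in enumerate(message): ciphers[i % length] += ch
def get_ciphers_alt (length : Int) (message : String) : List String :=
  if 0 < length then
    (PySem.List.enumerate message.toList 0).foldl
      (fun ciphers p =>
        let k := (PySem.Int.mod p.1 length).toNat
        ciphers.set k ((ciphers.getD k "") ++ String.ofList [p.2]))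
      (List.replicate length.toNat "")
  else []

-- ===== PRECONDITION & SPEC =====
def Spec_get_ciphers (length : Int) (message : String) (out : List String) : Prop := out = get_ciphers_alt length message
instance (length : Int) (message : String) (out : List String) : Decidable (Spec_get_ciphers length message out) := by unfold Spec_get_ciphers; infer_instance

-- ===== CLAIM (what is proved, stated in full; the proofs are below) =====
def Claim_equal_get_ciphers : Prop := ∀ (length : Int) (message : String), Dom_get_ciphers length message → Spec_get_ciphers length message (get_ciphers length message)

-- ===== LEMMAS AND PROOFS =====

-- A's while loop stops immediately past the end
theorem getCiphersWhile_past (msg : List Char) (L i : Int) (h : ¬(0 < L ∧ 0 ≤ i ∧ i < (msg.length : Int))) :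
    getCiphersWhile msg L i = [] := by
  rw [getCiphersWhile]; simp [h]

-- snoc characterisation of A's while loop
theorem getCiphersWhile_snoc (msg : List Char) (c : Char) (L : Int) (hL : 0 < L) :
    ∀ (i : Int), 0 ≤ i →
    getCiphersWhile (msg ++ [c]) L i =
      getCiphersWhile msg L i ++
        (if i ≤ (msg.length : Int) ∧ ((msg.length : Int) - i) % L = 0 then [c] else []) := by
  have hlen : (((msg ++ [c]).length : Nat) : Int) = (msg.length : Int) + 1 := by simp
  have key : ∀ (n : Nat) (i : Int), 0 ≤ i → ((msg.length : Int) + 1 - i).toNat ≤ n →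
      getCiphersWhile (msg ++ [c]) L i =
      getCiphersWhile msg L i ++
        (if i ≤ (msg.length : Int) ∧ ((msg.length : Int) - i) % L = 0 then [c] else []) := by
    intro n
    induction n with
    | zero =>
      intro i hi hb
      have hgt : (msg.length : Int) < i := by omega
      rw [getCiphersWhile_past _ _ _ (by omega),
          getCiphersWhile_past _ _ _ (by omega)]
      rw [if_neg (by omega)]; rfl
    | succ n ih =>
      intro i hi hb
      by_cases hcase : i < (msg.length : Int)
      · conv_lhs => rw [getCiphersWhile]
        rw [dif_pos (show 0 < L ∧ 0 ≤ i ∧ i < (((msg ++ [c]).length : Nat) : Int) by omega)]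
        conv_rhs => rw [getCiphersWhile]
        rw [dif_pos (show 0 < L ∧ 0 ≤ i ∧ i < ((msg.length : Nat) : Int) by omega)]
        have hget : (msg ++ [c])[i.toNat]'(by simp; omega) = msg[i.toNat]'(by omega) :=
          List.getElem_append_left (by omega)
        have hmod : ((msg.length : Int) - (i + L)) % L = ((msg.length : Int) - i) % L := by
          have h1 : (msg.length : Int) - (i + L) = ((msg.length : Int) - i) - L := by ring
          rw [h1, Int.sub_emod_right]
        have hiff : ((i + L) ≤ (msg.length : Int) ∧ ((msg.length : Int) - (i + L)) % L = 0) ↔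
            (i ≤ (msg.length : Int) ∧ ((msg.length : Int) - i) % L = 0) := by
          constructor
          · rintro ⟨h1, h2⟩; exact ⟨by omega, by rw [← hmod]; exact h2⟩
          · rintro ⟨h1, h2⟩
            have hd : L ∣ ((msg.length : Int) - i) := Int.dvd_of_emod_eq_zero h2
            have : L ≤ (msg.length : Int) - i := Int.le_of_dvd (by omega) hd
            exact ⟨by omega, by rw [hmod]; exact h2⟩
        rw [ih (i + L) (by omega) (by omega)]
        simp only [hget, List.cons_append]
        rw [if_congr hiff rfl rfl]
      · -- msg.length ≤ i
        rw [getCiphersWhile_past msg L i (by omega)]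
        by_cases heq : i = (msg.length : Int)
        · subst heq
          conv_lhs => rw [getCiphersWhile]
          rw [dif_pos (show 0 < L ∧ 0 ≤ (msg.length : Int) ∧ (msg.length : Int) < (((msg ++ [c]).length : Nat) : Int) by omega)]
          rw [getCiphersWhile_past (msg ++ [c]) L _ (by omega)]
          rw [if_pos ⟨le_refl _, by simp⟩]
          simp
        · rw [getCiphersWhile_past _ _ _ (by omega)]
          rw [if_neg (by omega)]
          simp
  intro i hi
  exact key ((msg.length : Int) + 1 - i).toNat i hi (le_refl _)

-- A's fold builds the map over range(length)
theorem foldl_append_singleton (f : Int → String) (l : List Int) (init : List String) :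
    l.foldl (fun acc x => acc ++ [f x]) init = init ++ l.map f := by
  induction l generalizing init with
  | nil => simp
  | cons x xs ih => simp [List.foldl_cons, ih]

theorem get_ciphers_eq_map (length : Int) (message : String) :
    get_ciphers length message =
      (PySem.List.pyRange 0 length 1).map
        (fun x => String.ofList (getCiphersWhile message.toList length x)) := by
  unfold get_ciphers
  rw [foldl_append_singleton]
  simp

theorem pymod_eq (a b : Int) (h1 : 0 < b) : PySem.Int.mod a b = a % b := by
  simp [PySem.Int.mod, Int.fmod_eq_emod, h1.le]

-- main bridge: for 0 < L, B's fold equals the map of A's strided scans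
theorem alt_fold_eq (L : Int) (hL : 0 < L) (msg : List Char) :
    (PySem.List.enumerate msg 0).foldl
      (fun ciphers p =>
        let k := (PySem.Int.mod p.1 L).toNat
        ciphers.set k ((ciphers.getD k "") ++ String.ofList [p.2]))
      (List.replicate L.toNat "") =
    (PySem.List.pyRange 0 L 1).map (fun x => String.ofList (getCiphersWhile msg L x)) := by
  induction msg using List.reverseRecOn with
  | nil =>
    rw [PySem.List.enumerate_nil, List.foldl_nil]
    symm
    rw [List.eq_replicate_iff]
    refine ⟨by simp [PySem.List.length_pyRange_one], ?_⟩
    intro b hb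
    simp only [List.mem_map] at hb
    obtain ⟨x, hx, rfl⟩ := hb
    rw [PySem.List.mem_pyRange_one] at hx
    rw [getCiphersWhile_past _ _ _ (by simp)]
  | append_singleton msg c ih =>
    rw [PySem.List.enumerate_append, List.foldl_append, ih]
    have hsing : PySem.List.enumerate [c] (0 + (msg.length : Int)) = [((msg.length : Int), c)] := by
      rw [PySem.List.enumerate_cons, PySem.List.enumerate_nil]; norm_num
    rw [hsing, List.foldl_cons, List.foldl_nil]
    simp only [pymod_eq _ _ hL]
    set n : Int := (msg.length : Int) with hn
    have hn0 : 0 ≤ n := by positivity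
    have hm0 : 0 ≤ n % L := Int.emod_nonneg n (by omega)
    have hmL : n % L < L := Int.emod_lt_of_pos n hL
    have hkmem : (n % L).toNat < L.toNat := by omega
    apply List.ext_getElem
    · simp [PySem.List.length_pyRange_one]
    intro j h1 h2
    have hjL : j < L.toNat := by
      simpa [PySem.List.length_pyRange_one] using h2
    have hrange : (PySem.List.pyRange 0 L 1).length = L.toNat := by
      simp [PySem.List.length_pyRange_one]
    rw [List.getElem_set]
    simp only [List.getElem_map, PySem.List.getElem_pyRange_one]
    rw [getCiphersWhile_snoc msg c L hL (0 + (j : Int)) (by omega)]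
    rw [List.getD_eq_getElem _ _ (by rw [List.length_map, hrange]; exact hkmem)]
    simp only [List.getElem_map, PySem.List.getElem_pyRange_one]
    by_cases hjk : (n % L).toNat = j
    · rw [if_pos hjk]
      have hj : (j : Int) = n % L := by omega
      have hdvd : (n - (0 + (j:Int))) % L = 0 := by
        rw [hj]
        have : n - (0 + n % L) = L * (n / L) := by
          have := Int.emod_def n L
          omega
        rw [this, Int.mul_emod_right]
      have hle : (0 + (j:Int)) ≤ n := by
        have h5 : n % L = n - L * (n / L) := Int.emod_def n L
        have h6 : 0 ≤ n / L := Int.ediv_nonneg hn0 hL.le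
        have h7 : 0 ≤ L * (n / L) := mul_nonneg hL.le h6
        omega
      rw [if_pos ⟨hle, hdvd⟩, ← hjk]
      have hcast : ((n % L).toNat : Int) = n % L := by omega
      simp [hcast]
    · rw [if_neg hjk]
      have hcond : ¬((0 + (j:Int)) ≤ n ∧ (n - (0 + (j:Int))) % L = 0) := by
        rintro ⟨hle, hmod⟩
        have hjj : (j : Int) % L = (j : Int) := Int.emod_eq_of_lt (by omega) (by omega)
        have : (n % L - (j : Int)) % L = 0 := by
          rw [← hjj]
          rw [Int.sub_emod] at hmod
          simpa using hmod
        have hd : L ∣ (n % L - (j : Int)) := Int.dvd_of_emod_eq_zero this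
        have : n % L - (j : Int) = 0 := by
          rcases hd with ⟨t, ht⟩
          have h8 : -L < L * t := by omega
          have h9 : L * t < L := by omega
          have ht0 : t = 0 := by
            rcases lt_trichotomy t 0 with h | h | h
            · nlinarith
            · exact h
            · nlinarith
          rw [ht0, mul_zero] at ht; omega
        exact hjk (by omega)
      rw [if_neg hcond]
      simp

-- ===== VERDICT (by name: the statement is the Claim_ definition above) =====
theorem get_ciphers_spec : Claim_equal_get_ciphers := by
  intro length message _
  unfold Spec_get_ciphers get_ciphers_alt
  rw [get_ciphers_eq_map]
  split
  · rw [alt_fold_eq length ‹_› message.toList]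
  · rw [PySem.List.pyRange_one_eq_nil (by omega)]; simp
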